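-- pv_equiv track=rewrite | github.com/Srish0218/DataCrafters-Delight | Code-Valley/Python-Prowess/Practise-Ques-1.py | generate_series
-- ===== SOURCE A (Python) =====
-- def generate_series(n):
--     series = []
--     for i in range(1, n + 1):
--         if i % 2 == 0:
--             power = i // 2
--             value = pow(3, power - 1)
--         else:
--             power = (i + 1) // 2
--             value = pow(2, power - 1)
--         series.append(value)
--     return series
-- ===== SOURCE B (Python) =====
-- def generate_series(n):
--     twos = [2 ** k for k in range((n + 1) // 2)]
--     threes = [3 ** k for k in range(n // 2)]
--     series = [None] * n
--     series[0::2] = twos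
--     series[1::2] = threes
--     return series
-- ===== Notes on version B (the rewrite author's own statement) =====
-- stated objective: alternative
-- what changed: Replaces A's single parity-branching loop (computing each element's power from its 1-based index) with two independent power-list comprehensions interleaved by strided slice assignment.
import Mathlib
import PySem

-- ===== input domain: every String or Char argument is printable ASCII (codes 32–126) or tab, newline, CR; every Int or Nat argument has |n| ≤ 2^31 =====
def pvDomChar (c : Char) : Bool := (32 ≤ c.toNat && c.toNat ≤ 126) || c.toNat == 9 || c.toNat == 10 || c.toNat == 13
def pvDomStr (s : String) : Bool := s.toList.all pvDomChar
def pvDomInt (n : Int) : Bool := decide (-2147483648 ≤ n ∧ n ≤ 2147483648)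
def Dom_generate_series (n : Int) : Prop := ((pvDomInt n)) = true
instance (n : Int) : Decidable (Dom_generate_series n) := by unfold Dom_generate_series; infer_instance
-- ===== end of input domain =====

-- B builds the two power lists separately and interleaves them, instead of A's parity-branching loop.

-- ===== PORT A =====
-- pow(3, power-1)/pow(2, power-1): the exponent is ≥ 0 for every i the loop visits, so '.toNat' is exact here.
def generate_series (n : Int) : List Int :=
  (PySem.List.pyRange 1 (n + 1) 1).foldl
    (fun series i =>
      if PySem.Int.mod i 2 == 0 then
        series ++ [(3 : Int) ^ (PySem.Int.floordiv i 2 - 1).toNat]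
      else
        series ++ [(2 : Int) ^ (PySem.Int.floordiv (i + 1) 2 - 1).toNat])
    []

-- ===== PORT B =====
-- 'series[0::2] = twos; series[1::2] = threes' into '[None]*n' is the interleave of the two lists
-- (lengths match exactly: (n+1)//2 + n//2 = max n 0).  2**k: k ≥ 0 throughout the range, '.toNat' exact.
def pvInterleave : List Int → List Int → List Int
  | [], ys => ys
  | x :: xs, ys => x :: pvInterleave ys xs
termination_by xs ys => xs.length + ys.length
decreasing_by simp; omega

def generate_series_alt (n : Int) : List Int :=
  let twos := (PySem.List.pyRange 0 (PySem.Int.floordiv (n + 1) 2) 1).map (fun k => (2 : Int) ^ k.toNat)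
  let threes := (PySem.List.pyRange 0 (PySem.Int.floordiv n 2) 1).map (fun k => (3 : Int) ^ k.toNat)
  pvInterleave twos threes

-- ===== PRECONDITION & SPEC =====
def Spec_generate_series (n : Int) (out : List Int) : Prop := out = generate_series_alt n
instance (n : Int) (out : List Int) : Decidable (Spec_generate_series n out) := by unfold Spec_generate_series; infer_instance

-- ===== CLAIM (what is proved, stated in full; the proofs are below) =====
def Claim_equal_generate_series : Prop := ∀ (n : Int), Dom_generate_series n → Spec_generate_series n (generate_series n)

-- ===== LEMMAS AND PROOFS =====

-- interleaving two mapped ranges (second at most one shorter) is a single parity-split mapped range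
lemma pvInterleave_map_range : ∀ (t a b : Nat), a + b ≤ t → b ≤ a → a ≤ b + 1 →
    ∀ f g : Nat → Int,
    pvInterleave ((List.range a).map f) ((List.range b).map g)
      = (List.range (a + b)).map (fun i => if i % 2 = 0 then f (i / 2) else g (i / 2)) := by
  intro t
  induction t with
  | zero =>
    intro a b hab hba _ f g
    have ha : a = 0 := by omega
    have hb : b = 0 := by omega
    subst ha; subst hb
    simp [pvInterleave]
  | succ t ih =>
    intro a b hab hba hab1 f g
    cases a with
    | zero =>
      have hb : b = 0 := by omega
      subst hb
      simp [pvInterleave]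
    | succ a' =>
      rw [List.range_succ_eq_map, List.map_cons, List.map_map]
      show pvInterleave (f 0 :: _) _ = _
      rw [pvInterleave]
      have hsum : a' + 1 + b = (b + a') + 1 := by omega
      rw [hsum, List.range_succ_eq_map, List.map_cons, List.map_map,
          ih b a' (by omega) (by omega) (by omega) g (f ∘ Nat.succ)]
      have hmap : List.map (fun i => if i % 2 = 0 then g (i / 2) else (f ∘ Nat.succ) (i / 2))
            (List.range (b + a'))
          = List.map ((fun i => if i % 2 = 0 then f (i / 2) else g (i / 2)) ∘ Nat.succ)
            (List.range (b + a')) := by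
        apply List.map_congr_left
        intro i _
        simp only [Function.comp, Nat.succ_eq_add_one]
        by_cases h : i % 2 = 0
        · have h1 : ¬ ((i + 1) % 2 = 0) := by omega
          have h2 : (i + 1) / 2 = i / 2 := by omega
          rw [if_pos h, if_neg h1, h2]
        · have h1 : (i + 1) % 2 = 0 := by omega
          have h2 : (i + 1) / 2 = i / 2 + 1 := by omega
          rw [if_neg h, if_pos h1, h2]
      rw [hmap]
      simp

-- A's loop as a map over the 0-based range
lemma generate_series_eq_map (n : Int) :
    generate_series n = (List.range (n.toNat)).map
      (fun k => if k % 2 = 0 then (2 : Int) ^ (k / 2) else (3 : Int) ^ (k / 2)) := by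
  unfold generate_series
  have hbody : (fun (series : List Int) (i : Int) =>
      if PySem.Int.mod i 2 == 0 then
        series ++ [(3 : Int) ^ (PySem.Int.floordiv i 2 - 1).toNat]
      else
        series ++ [(2 : Int) ^ (PySem.Int.floordiv (i + 1) 2 - 1).toNat])
      = (fun series i => series ++
          [if PySem.Int.mod i 2 == 0 then (3 : Int) ^ (PySem.Int.floordiv i 2 - 1).toNat
           else (2 : Int) ^ (PySem.Int.floordiv (i + 1) 2 - 1).toNat]) := by
    funext s i
    split <;> rfl
  rw [hbody, PySem.List.foldl_append_singleton_eq_map, PySem.List.pyRange_one, List.map_map]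
  have hlen : (n + 1 - 1).toNat = n.toNat := by omega
  rw [hlen]
  apply List.map_congr_left
  intro k _
  simp only [Function.comp]
  rw [PySem.Int.mod_eq_emod_of_pos (by omega : (0:Int) < 2),
      PySem.Int.floordiv_eq_ediv_of_pos (by omega : (0:Int) < 2),
      PySem.Int.floordiv_eq_ediv_of_pos (by omega : (0:Int) < 2)]
  by_cases h : k % 2 = 0
  · have h1 : (((1 + (k : Int)) % 2) == 0) = false := by
      simp only [beq_eq_false_iff_ne, ne_eq]
      omega
    have h2 : ((1 + (k : Int) + 1) / 2 - 1).toNat = k / 2 := by omega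
    simp [h1, h2, h]
  · have h1 : (((1 + (k : Int)) % 2) == 0) = true := by
      simp only [beq_iff_eq]
      omega
    have h2 : ((1 + (k : Int)) / 2 - 1).toNat = k / 2 := by omega
    simp [h1, h2, h]

-- B as the same map, via the interleave lemma
lemma generate_series_alt_eq_map (n : Int) :
    generate_series_alt n = (List.range (n.toNat)).map
      (fun k => if k % 2 = 0 then (2 : Int) ^ (k / 2) else (3 : Int) ^ (k / 2)) := by
  simp only [generate_series_alt]
  rw [PySem.Int.floordiv_eq_ediv_of_pos (by omega : (0:Int) < 2),
      PySem.Int.floordiv_eq_ediv_of_pos (by omega : (0:Int) < 2)]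
  have ha : ((n + 1) / 2 - 0).toNat = (n.toNat + 1) / 2 := by omega
  have hb : (n / 2 - 0).toNat = n.toNat / 2 := by omega
  rw [PySem.List.pyRange_one, PySem.List.pyRange_one, ha, hb, List.map_map, List.map_map]
  have htwos : ((fun k : Int => (2 : Int) ^ k.toNat) ∘ fun k : Nat => (0 : Int) + (k : Int))
      = (fun k : Nat => (2 : Int) ^ k) := by
    funext k; simp
  have hthrees : ((fun k : Int => (3 : Int) ^ k.toNat) ∘ fun k : Nat => (0 : Int) + (k : Int))
      = (fun k : Nat => (3 : Int) ^ k) := by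
    funext k; simp
  rw [htwos, hthrees,
      pvInterleave_map_range ((n.toNat + 1) / 2 + n.toNat / 2) _ _ (le_refl _)
        (by omega) (by omega)]
  have hsum : (n.toNat + 1) / 2 + n.toNat / 2 = n.toNat := by omega
  rw [hsum]

-- ===== VERDICT (by name: the statement is the Claim_ definition above) =====
theorem generate_series_spec : Claim_equal_generate_series := by
  intro n _
  unfold Spec_generate_series
  rw [generate_series_eq_map, generate_series_alt_eq_map]
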